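-- pv_equiv track=rewrite | github.com/bytedance/monolith | monolith/native_training/summary/utils.py | _name_to_group_id
-- ===== SOURCE A (Python) =====
-- from typing import Any, Dict, List, Tuple, Union
--
-- def _name_to_group_id(segment_names: List[str], group_info: List[List[str]]):
--   if group_info:
--     name_to_group: Dict[str, int] = {}
--     for i, group in enumerate(group_info):
--       for name in group:
--         name_to_group[name] = i
--
--     group_id_to_names: Dict[int, List[str]] = {}
--     for name in segment_names:
--       assert name in name_to_group
--       group_id = name_to_group[name]
--       if group_id in group_id_to_names:
--         group_id_to_names[group_id].append(name)
--       else: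
--         group_id_to_names[group_id] = [name]
--
--     name_to_reorder_id = {}
--     for idx, group_id in enumerate(sorted(group_id_to_names)):
--       for name in group_id_to_names[group_id]:
--         name_to_reorder_id[name] = idx
--     name_to_reorder_id = name_to_reorder_id
--   else:
--     name_to_reorder_id = {name: idx for idx, name in enumerate(segment_names)}
--
--   return name_to_reorder_id
-- ===== SOURCE B (Python) =====
-- def _name_to_group_id(segment_names, group_info):
--   if not group_info:
--     return dict(zip(segment_names, range(len(segment_names))))
--   gid = {name: i for i, group in enumerate(group_info) for name in group}
--   for name in segment_names:
--     assert name in gid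
--   order = sorted({gid[name] for name in segment_names})
--   return dict((name, idx)
--               for idx, g in enumerate(order)
--               for name in segment_names if gid[name] == g)
-- ===== Notes on version B (the rewrite author's own statement) =====
-- stated objective: simpler
-- what changed: B drops A's intermediate group_id->names bucket dict and both explicit dict-mutation loops: it builds name->group as one dict comprehension, takes the sorted set of group ids that occur among segment_names, and produces the result with a single dict() over a generator that pairs each name with its group's rank.
import Mathlib
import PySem

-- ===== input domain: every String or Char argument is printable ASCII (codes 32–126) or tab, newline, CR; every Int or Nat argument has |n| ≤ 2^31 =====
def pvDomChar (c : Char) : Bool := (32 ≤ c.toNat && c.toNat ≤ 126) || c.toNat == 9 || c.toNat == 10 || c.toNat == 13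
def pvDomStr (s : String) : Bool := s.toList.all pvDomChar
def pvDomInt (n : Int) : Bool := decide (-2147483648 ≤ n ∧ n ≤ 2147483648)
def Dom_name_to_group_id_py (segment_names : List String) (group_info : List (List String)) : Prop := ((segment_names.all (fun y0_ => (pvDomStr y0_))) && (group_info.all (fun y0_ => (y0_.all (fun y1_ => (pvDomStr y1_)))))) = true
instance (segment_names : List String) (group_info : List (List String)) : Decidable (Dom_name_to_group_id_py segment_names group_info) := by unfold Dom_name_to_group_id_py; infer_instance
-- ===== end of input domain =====

-- B replaces A's three mutating dict-building loops (bucket dict group_id->names, then a nested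
-- re-insertion loop) by comprehensions: one dict comprehension for name->group, the sorted set of
-- group ids that occur, and a single generator expression fed to dict() (objective: simpler).

-- ===== PORT A =====
def name_to_group_id_py (segment_names : List String) (group_info : List (List String)) : List (String × Int) :=
  if group_info ≠ [] then
    let name_to_group : PySem.Dict String Int :=
      (PySem.List.enumerate group_info).foldl
        (fun d p => p.2.foldl (fun d name => d.insert name p.1) d) PySem.Dict.empty
    -- 'assert name in name_to_group': an input failing it raises in Python and is excluded by Pre_
    let group_id_to_names : PySem.Dict Int (List String) :=
      segment_names.foldl
        (fun d name =>
          let gid := name_to_group.getD name 0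
          if d.contains gid then d.insert gid (d.getD gid [] ++ [name])
          else d.insert gid [name]) PySem.Dict.empty
    ((PySem.List.enumerate (PySem.List.sorted group_id_to_names.keys (fun x => x) false)).foldl
      (fun (d : PySem.Dict String Int) p =>
        (group_id_to_names.getD p.2 []).foldl (fun d name => d.insert name p.1) d)
      PySem.Dict.empty).items
  else
    ((PySem.List.enumerate segment_names).foldl
      (fun (d : PySem.Dict String Int) p => d.insert p.2 p.1) PySem.Dict.empty).items

-- ===== PORT B =====
def name_to_group_id_py_alt (segment_names : List String) (group_info : List (List String)) : List (String × Int) :=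
  if ¬ group_info ≠ [] then
    (PySem.Dict.ofList (segment_names.zip (PySem.List.pyRange 0 segment_names.length 1))).items
  else
    let gid : PySem.Dict String Int :=
      PySem.Dict.ofList ((PySem.List.enumerate group_info).flatMap
        (fun p => p.2.map (fun name => (name, p.1))))
    -- 'assert name in gid': an input failing it raises in Python and is excluded by Pre_
    let order : List Int :=
      PySem.List.sorted (PySem.Set.ofList (segment_names.map (fun name => gid.getD name 0)))
        (fun x => x) false
    (PySem.Dict.ofList ((PySem.List.enumerate order).flatMap
      (fun p => (segment_names.filter (fun name => gid.getD name 0 == p.2)).map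
        (fun name => (name, p.1))))).items

-- ===== PRECONDITION & SPEC =====
-- Pre_ excludes exactly the inputs where the 'assert name in name_to_group' fails
-- (AssertionError): group_info nonempty and some segment name belonging to no group.
-- B raises there as well.
def Pre_name_to_group_id_py (segment_names : List String) (group_info : List (List String)) : Prop :=
  group_info = [] ∨ ∀ name ∈ segment_names, ∃ g ∈ group_info, name ∈ g
instance (segment_names : List String) (group_info : List (List String)) : Decidable (Pre_name_to_group_id_py segment_names group_info) := by unfold Pre_name_to_group_id_py; infer_instance
def pvWitness_name_to_group_id_py : List String × List (List String) :=
  (["b", "a", "b"], [["a", "c"], ["b"]])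

def Spec_name_to_group_id_py (segment_names : List String) (group_info : List (List String)) (out : List (String × Int)) : Prop := out = name_to_group_id_py_alt segment_names group_info
instance (segment_names : List String) (group_info : List (List String)) (out : List (String × Int)) : Decidable (Spec_name_to_group_id_py segment_names group_info out) := by unfold Spec_name_to_group_id_py; infer_instance

-- ===== CLAIM (what is proved, stated in full; the proofs are below) =====
def Claim_equal_name_to_group_id_py : Prop := ∀ (segment_names : List String) (group_info : List (List String)), Dom_name_to_group_id_py segment_names group_info → Pre_name_to_group_id_py segment_names group_info → Spec_name_to_group_id_py segment_names group_info (name_to_group_id_py segment_names group_info)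

-- ===== LEMMAS AND PROOFS =====

-- A's bucket-building step, written as a single insert (the two branches insert at the same key).
theorem pv_bucket_step_eq (g : String → Int) (d : PySem.Dict Int (List String)) (name : String) :
    (if d.contains (g name) then d.insert (g name) (d.getD (g name) [] ++ [name])
     else d.insert (g name) [name])
    = d.insert (g name)
        (if d.contains (g name) then d.getD (g name) [] ++ [name] else [name]) := by
  split_ifs <;> rfl

-- keys of A's bucket dict = the set of group ids in first-appearance order
theorem pv_bucket_keys (g : String → Int) (l : List String) :
    (l.foldl (fun d name =>
        if d.contains (g name) then d.insert (g name) (d.getD (g name) [] ++ [name])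
        else d.insert (g name) [name]) (PySem.Dict.empty : PySem.Dict Int (List String))).keys
    = PySem.Set.ofList (l.map g) := by
  have hstep : (fun (d : PySem.Dict Int (List String)) name =>
      if d.contains (g name) then d.insert (g name) (d.getD (g name) [] ++ [name])
      else d.insert (g name) [name])
      = fun d name => d.insert (g name)
          (if d.contains (g name) then d.getD (g name) [] ++ [name] else [name]) := by
    funext d name; exact pv_bucket_step_eq g d name
  rw [hstep, PySem.Dict.keys_foldl_insert_key]
  rfl

-- each bucket of A's dict is the corresponding filter of segment_names
theorem pv_bucket_getD (g : String → Int) (l : List String) (d : PySem.Dict Int (List String)) (c : Int) :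
    (l.foldl (fun d name =>
        if d.contains (g name) then d.insert (g name) (d.getD (g name) [] ++ [name])
        else d.insert (g name) [name]) d).getD c []
    = d.getD c [] ++ l.filter (fun name => g name == c) := by
  induction l generalizing d with
  | nil => simp
  | cons n l ih =>
    rw [List.foldl_cons, ih]
    by_cases hc : g n = c
    · subst hc
      by_cases hd : d.contains (g n)
      · simp [hd]
      · rw [Bool.not_eq_true] at hd
        have hn := (PySem.Dict.get?_eq_none_iff_contains d (g n)).2 hd
        have h0 : d.getD (g n) [] = [] := by simp [PySem.Dict.getD, hn]
        simp [hd, h0]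
    · by_cases hd : d.contains (g n) <;> simp [hd, hc, PySem.Dict.getD_insert, Ne.symm hc]

-- zip(names, range(len(names))) is enumerate with the pair swapped
theorem pv_zip_range (seg : List String) (k : Int) :
    seg.zip (PySem.List.pyRange k (k + seg.length) 1)
    = (PySem.List.enumerate seg k).map (fun p => (p.2, p.1)) := by
  induction seg generalizing k with
  | nil => simp [PySem.List.enumerate]
  | cons x t ih =>
    have hlt : k < k + ((x :: t).length : Int) := by simp only [List.length_cons]; push_cast; omega
    rw [PySem.List.pyRange_one_cons hlt]
    have hb : k + ((x :: t).length : Int) = (k + 1) + (t.length : Int) := by simp only [List.length_cons]; push_cast; omega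
    rw [hb]
    simp only [List.zip_cons_cons, PySem.List.enumerate, List.map_cons]
    rw [ih (k + 1)]

-- A's nested insert loop over enumerate(group_info) equals B's dict comprehension
theorem pv_ntg_eq (gi : List (List String)) :
    (PySem.List.enumerate gi).foldl
      (fun (d : PySem.Dict String Int) p => p.2.foldl (fun d name => d.insert name p.1) d)
      PySem.Dict.empty
    = PySem.Dict.ofList ((PySem.List.enumerate gi).flatMap
        (fun p => p.2.map (fun name => (name, p.1)))) := by
  rw [PySem.Dict.ofList, PySem.Dict.update, List.foldl_flatMap]
  apply PySem.List.foldl_congr_mem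
  intro d p _
  rw [List.foldl_map]

-- ===== VERDICT (by name: the statement is the Claim_ definition above) =====
theorem name_to_group_id_py_spec : Claim_equal_name_to_group_id_py := by
  intro segment_names group_info _ _
  unfold Spec_name_to_group_id_py name_to_group_id_py name_to_group_id_py_alt
  by_cases hgi : group_info = []
  · simp only [hgi, ne_eq, not_true_eq_false, if_neg, if_pos, not_false_eq_true]
    congr 1
    have hz := pv_zip_range segment_names 0
    rw [zero_add] at hz
    rw [PySem.Dict.ofList, PySem.Dict.update, hz, List.foldl_map]
  · simp only [hgi, ne_eq, not_false_eq_true, if_pos, if_neg, not_true_eq_false]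
    rw [← pv_ntg_eq group_info]
    set ntg : PySem.Dict String Int :=
      (PySem.List.enumerate group_info).foldl
        (fun d p => p.2.foldl (fun d name => d.insert name p.1) d) PySem.Dict.empty with hntg
    set g : String → Int := fun name => ntg.getD name 0 with hg
    rw [pv_bucket_keys g segment_names]
    rw [PySem.Dict.ofList, PySem.Dict.update, List.foldl_flatMap]
    congr 1
    apply PySem.List.foldl_congr_mem
    intro d p _
    rw [List.foldl_map, pv_bucket_getD g segment_names PySem.Dict.empty p.2]
    rfl
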